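-- pv_equiv track=rewrite | github.com/hawkeyed-panda/memoire-de-parfum | frontend/app.py | match_single
-- ===== SOURCE A (Python) =====
-- def match_single(text: str, options: list):
--     t = text.lower().strip()
--     for v, lbl in options:
--         if t == v.lower() or t == lbl.lower():
--             return v, lbl
--     for v, lbl in options:
--         if t in v.lower() or t in lbl.lower() or v.lower() in t or lbl.lower() in t:
--             return v, lbl
--     return None
-- ===== SOURCE B (Python) =====
-- def match_single(text: str, options: list):
--     t = text.lower().strip()
--     fallback = None
--     for v, lbl in options:
--         vl = v.lower()
--         ll = lbl.lower()
--         if t == vl or t == ll: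
--             return v, lbl
--         if fallback is None and (t in vl or t in ll or vl in t or ll in t):
--             fallback = (v, lbl)
--     return fallback
-- ===== Notes on version B (the rewrite author's own statement) =====
-- stated objective: simpler
-- what changed: Replaces A's two sequential passes over options (exact pass, then substring pass) with a single loop that short-circuits on an exact match and carries the first substring match as a fallback returned at the end.
import Mathlib
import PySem

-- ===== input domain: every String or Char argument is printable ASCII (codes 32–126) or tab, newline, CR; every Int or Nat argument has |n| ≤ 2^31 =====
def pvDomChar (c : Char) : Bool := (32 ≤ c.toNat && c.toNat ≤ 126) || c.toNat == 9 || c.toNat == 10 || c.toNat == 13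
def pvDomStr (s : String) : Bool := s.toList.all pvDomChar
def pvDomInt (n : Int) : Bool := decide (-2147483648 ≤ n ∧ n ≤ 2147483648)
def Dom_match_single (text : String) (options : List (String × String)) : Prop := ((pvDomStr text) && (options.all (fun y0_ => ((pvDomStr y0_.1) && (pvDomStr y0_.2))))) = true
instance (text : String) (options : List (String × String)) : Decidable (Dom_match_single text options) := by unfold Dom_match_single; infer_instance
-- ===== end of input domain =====

-- B replaces A's two sequential passes with a single loop carrying the first substring match as a fallback (objective: simpler).

-- ===== PORT A =====
-- A's first loop: exact (case-insensitive) match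
def msLoopExact (t : String) : List (String × String) → Option (String × String)
  | [] => none
  | (v, lbl) :: rest =>
      if t == PySem.Str.lower v || t == PySem.Str.lower lbl then some (v, lbl)
      else msLoopExact t rest

-- A's second loop: substring match either way
def msLoopSub (t : String) : List (String × String) → Option (String × String)
  | [] => none
  | (v, lbl) :: rest =>
      if PySem.Str.isIn t (PySem.Str.lower v) || PySem.Str.isIn t (PySem.Str.lower lbl)
         || PySem.Str.isIn (PySem.Str.lower v) t || PySem.Str.isIn (PySem.Str.lower lbl) t then some (v, lbl)
      else msLoopSub t rest

def match_single (text : String) (options : List (String × String)) : Option (String × String) :=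
  let t := PySem.Str.strip (PySem.Str.lower text)
  match msLoopExact t options with
  | some r => some r
  | none => msLoopSub t options

-- ===== PORT B =====
-- B's single loop with a fallback accumulator (set only when still none)
def msLoopB (t : String) : List (String × String) → Option (String × String) → Option (String × String)
  | [], fb => fb
  | (v, lbl) :: rest, fb =>
      let vl := PySem.Str.lower v
      let ll := PySem.Str.lower lbl
      if t == vl || t == ll then some (v, lbl)
      else msLoopB t rest
        (if fb.isNone && (PySem.Str.isIn t vl || PySem.Str.isIn t ll
            || PySem.Str.isIn vl t || PySem.Str.isIn ll t) then some (v, lbl) else fb)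

def match_single_alt (text : String) (options : List (String × String)) : Option (String × String) :=
  let t := PySem.Str.strip (PySem.Str.lower text)
  msLoopB t options none

-- ===== PRECONDITION & SPEC =====
def Spec_match_single (text : String) (options : List (String × String)) (out : Option (String × String)) : Prop := out = match_single_alt text options
instance (text : String) (options : List (String × String)) (out : Option (String × String)) : Decidable (Spec_match_single text options out) := by unfold Spec_match_single; infer_instance

-- ===== CLAIM (what is proved, stated in full; the proofs are below) =====
def Claim_equal_match_single : Prop := ∀ (text : String) (options : List (String × String)), Dom_match_single text options → Spec_match_single text options (match_single text options)

-- ===== LEMMAS AND PROOFS =====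
-- Invariant of B's loop: an exact match wins; otherwise an already-set fallback wins; otherwise it is A's second loop.
theorem msLoopB_eq (t : String) (opts : List (String × String)) :
    ∀ fb : Option (String × String),
      msLoopB t opts fb =
        match msLoopExact t opts with
        | some r => some r
        | none => match fb with
                  | some f => some f
                  | none => msLoopSub t opts := by
  induction opts with
  | nil => intro fb; cases fb <;> rfl
  | cons p rest ih =>
      intro fb
      obtain ⟨v, lbl⟩ := p
      simp only [msLoopB, msLoopExact, msLoopSub]
      by_cases hex : (t == PySem.Str.lower v || t == PySem.Str.lower lbl) = true
      · simp [hex]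
      · simp only [hex, if_false, Bool.false_eq_true]
        rw [ih]
        cases fb with
        | some f => simp
        | none =>
            cases h : msLoopExact t rest <;> simp only [h] <;> split_ifs <;> simp_all

-- ===== VERDICT (by name: the statement is the Claim_ definition above) =====
theorem match_single_spec : Claim_equal_match_single := by
  intro text options _
  unfold Spec_match_single match_single match_single_alt
  rw [msLoopB_eq]
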